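-- pv_equiv track=rewrite | github.com/brendanbikes/adventOfCode2023 | day14/day14Code.py | rotate_ccw
-- ===== SOURCE A (Python) =====
-- def rotate_ccw(indices: [], is_barriers: bool, size: int):
--     # rotate the grid counterclockwise 90 degrees, because the "tilt" mechanism/function only tilts to the left
--     new_indices = []
--     for j in range(size)[::-1]:
--         new_row = []
--         for i, row in enumerate(indices):
--             if j in row:
--                 new_row.append(i)
--         if is_barriers:
--             new_row = [-1] + new_row + [size]
--         new_indices.append(new_row)
--
--     return new_indices
-- ===== SOURCE B (Python) =====
-- def rotate_ccw(indices: [], is_barriers: bool, size: int):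
--     # Single bucket pass over the entries instead of scanning every row for every j.
--     buckets = {}
--     for i, row in enumerate(indices):
--         for v in dict.fromkeys(row):
--             if 0 <= v < size:
--                 buckets.setdefault(v, []).append(i)
--     new_indices = []
--     for j in range(size - 1, -1, -1):
--         row = buckets.get(j, [])
--         if is_barriers:
--             row = [-1] + row + [size]
--         new_indices.append(row)
--     return new_indices
-- ===== Notes on version B (the rewrite author's own statement) =====
-- stated objective: faster
-- what changed: Instead of scanning every row for membership of every column j (nested loops over range(size) x indices), B makes one bucket pass over the entries (appending each row index i to bucket[v] once per distinct in-range value v) and then emits the buckets in descending column order.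
import Mathlib
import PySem

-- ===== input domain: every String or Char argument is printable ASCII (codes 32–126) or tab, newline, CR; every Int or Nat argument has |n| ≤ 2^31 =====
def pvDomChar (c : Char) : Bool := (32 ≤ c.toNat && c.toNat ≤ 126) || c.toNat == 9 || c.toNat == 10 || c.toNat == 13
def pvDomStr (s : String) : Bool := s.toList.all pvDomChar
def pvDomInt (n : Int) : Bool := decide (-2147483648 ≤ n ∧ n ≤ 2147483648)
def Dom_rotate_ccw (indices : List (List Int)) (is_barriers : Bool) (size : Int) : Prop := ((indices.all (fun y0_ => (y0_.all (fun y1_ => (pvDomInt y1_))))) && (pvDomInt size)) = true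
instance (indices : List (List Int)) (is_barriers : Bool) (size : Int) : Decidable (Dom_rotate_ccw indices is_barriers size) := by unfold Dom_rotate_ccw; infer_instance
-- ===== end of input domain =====

-- B replaces A's per-column scan of every row (O(size·rows·rowlen)) by one bucket pass over the
-- entries followed by emitting the buckets in descending column order (objective: faster).

-- ===== PORT A =====
-- range(size)[::-1] is the reverse of range(size) (PySem.List.slice?_none_none_neg_one)
def rotate_ccw (indices : List (List Int)) (is_barriers : Bool) (size : Int) : List (List Int) :=
  ((PySem.List.pyRange 0 size 1).reverse).foldl (fun new_indices j =>
    let new_row : List Int :=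
      (PySem.List.enumerate indices 0).foldl
        (fun acc p => if j ∈ p.2 then acc ++ [p.1] else acc) []
    let new_row := if is_barriers then [-1] ++ new_row ++ [size] else new_row
    new_indices ++ [new_row]) []

-- ===== PORT B =====
-- buckets.setdefault(v, []).append(i)  ≡  store (old bucket ++ [i]) at key v, keeping the key's position
def rotate_ccw_alt (indices : List (List Int)) (is_barriers : Bool) (size : Int) : List (List Int) :=
  let buckets : PySem.Dict Int (List Int) :=
    (PySem.List.enumerate indices 0).foldl (fun b p =>
      (PySem.List.dedup p.2).foldl (fun b v =>
        if 0 ≤ v ∧ v < size then b.insert v (b.getD v [] ++ [p.1]) else b) b)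
      PySem.Dict.empty
  (PySem.List.pyRange (size - 1) (-1) (-1)).foldl (fun new_indices j =>
    let row := buckets.getD j []
    let row := if is_barriers then [-1] ++ row ++ [size] else row
    new_indices ++ [row]) []

-- ===== PRECONDITION & SPEC =====
def Spec_rotate_ccw (indices : List (List Int)) (is_barriers : Bool) (size : Int) (out : List (List Int)) : Prop := out = rotate_ccw_alt indices is_barriers size
instance (indices : List (List Int)) (is_barriers : Bool) (size : Int) (out : List (List Int)) : Decidable (Spec_rotate_ccw indices is_barriers size out) := by unfold Spec_rotate_ccw; infer_instance

-- ===== CLAIM (what is proved, stated in full; the proofs are below) =====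
def Claim_equal_rotate_ccw : Prop := ∀ (indices : List (List Int)) (is_barriers : Bool) (size : Int), Dom_rotate_ccw indices is_barriers size → Spec_rotate_ccw indices is_barriers size (rotate_ccw indices is_barriers size)

-- ===== LEMMAS AND PROOFS =====

-- effect of one row's (deduplicated) inner loop on the bucket of a fixed in-range column j
lemma bucket_inner (size i j : Int) (hj0 : 0 ≤ j) (hjs : j < size) :
    ∀ (l : List Int) (b : PySem.Dict Int (List Int)), l.Nodup →
      (l.foldl (fun b v =>
          if 0 ≤ v ∧ v < size then b.insert v (b.getD v [] ++ [i]) else b) b).getD j []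
        = if j ∈ l then b.getD j [] ++ [i] else b.getD j [] := by
  intro l
  induction l with
  | nil => intro b _; simp
  | cons v t ih =>
    intro b hnd
    have hndt : t.Nodup := hnd.of_cons
    have hvt : v ∉ t := (List.nodup_cons.mp hnd).1
    rw [List.foldl_cons, ih _ hndt]
    by_cases hvj : v = j
    · subst hvj
      rw [if_neg hvt, if_pos (show (0:Int) ≤ v ∧ v < size from ⟨hj0, hjs⟩),
        if_pos (List.mem_cons_self), PySem.Dict.getD_insert]
      simp
    · have hstep : (if 0 ≤ v ∧ v < size then b.insert v (b.getD v [] ++ [i]) else b).getD j []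
          = b.getD j [] := by
        split_ifs with h
        · rw [PySem.Dict.getD_insert, if_neg (fun h' => hvj h'.symm)]
        · rfl
      rw [hstep]
      have hmem : (j ∈ v :: t) ↔ j ∈ t := by
        simp [List.mem_cons, Ne.symm hvj]
      rw [if_congr hmem rfl rfl]

-- the finished buckets at an in-range column j hold exactly A's column scan
lemma bucket_spec (size j : Int) (hj0 : 0 ≤ j) (hjs : j < size) :
    ∀ (ps : List (Int × List Int)) (b : PySem.Dict Int (List Int)),
      (ps.foldl (fun b p =>
          (PySem.List.dedup p.2).foldl (fun b v =>
            if 0 ≤ v ∧ v < size then b.insert v (b.getD v [] ++ [p.1]) else b) b) b).getD j []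
        = b.getD j [] ++ (ps.filter (fun p => decide (j ∈ p.2))).map (·.1) := by
  intro ps
  induction ps with
  | nil => intro b; simp
  | cons p t ih =>
    intro b
    rw [List.foldl_cons, ih,
      bucket_inner size p.1 j hj0 hjs _ b (PySem.List.nodup_dedup p.2)]
    simp only [PySem.List.mem_dedup]
    by_cases hm : j ∈ p.2
    · simp [hm]
    · simp [hm]

theorem rotate_ccw_eq_alt (indices : List (List Int)) (is_barriers : Bool) (size : Int) :
    rotate_ccw indices is_barriers size = rotate_ccw_alt indices is_barriers size := by
  unfold rotate_ccw rotate_ccw_alt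
  have hr : PySem.List.pyRange (size - 1) (-1) (-1) = (PySem.List.pyRange 0 size 1).reverse := by
    rw [PySem.List.pyRange_neg_one_eq_reverse]
    norm_num
  rw [hr]
  rw [PySem.List.foldl_append_singleton_eq_map, PySem.List.foldl_append_singleton_eq_map]
  refine congrArg _ (List.map_congr_left ?_)
  intro j hjmem
  have hj : 0 ≤ j ∧ j < size := PySem.List.mem_pyRange_one.mp (List.mem_reverse.mp hjmem)
  have hA : (PySem.List.enumerate indices 0).foldl
      (fun acc (p : Int × List Int) => if j ∈ p.2 then acc ++ [p.1] else acc) []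
      = ((PySem.List.enumerate indices 0).filter (fun p => decide (j ∈ p.2))).map (·.1) := by
    have := PySem.List.foldl_append_if (fun p : Int × List Int => decide (j ∈ p.2))
      (fun p => p.1) (PySem.List.enumerate indices 0) []
    simpa using this
  rw [hA, bucket_spec size j hj.1 hj.2 (PySem.List.enumerate indices 0) PySem.Dict.empty]
  rfl

-- ===== VERDICT (by name: the statement is the Claim_ definition above) =====
theorem rotate_ccw_spec : Claim_equal_rotate_ccw := by
  intro indices is_barriers size _
  unfold Spec_rotate_ccw
  exact rotate_ccw_eq_alt indices is_barriers size
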